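-- pv_equiv track=rewrite | github.com/Upkirat17/rugved_taskphase_upkirat | q3.py | check_hill_number
-- ===== SOURCE A (Python) =====
-- def check_hill_number(n):
--
--     digits=[int(d) for d in str(n)]
--     if len(digits)<3:
--         return False
--
--     increasing=True
--
--     for i in range(1,len(digits)):
--         if increasing:
--             if digits[i] < digits[i-1]:
--                 increasing=False
--             elif digits[i]==digits[i-1]:
--                 return False
--
--         else:
--             if digits[i]>=digits[i-1]:
--                 return False
--
--     return not increasing
-- ===== SOURCE B (Python) =====
-- def check_hill_number(n):
--     digits = [int(d) for d in str(n)]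
--     if len(digits) < 3:
--         return False
--     m = digits.index(max(digits))
--     if m == len(digits) - 1:
--         return False
--     return (all(digits[j] < digits[j + 1] for j in range(m))
--             and all(digits[j] > digits[j + 1] for j in range(m, len(digits) - 1)))
-- ===== Notes on version B (the rewrite author's own statement) =====
-- stated objective: alternative
-- what changed: Instead of A's stateful left-to-right scan with an 'increasing' flag, B locates the candidate peak directly as the index of the maximum digit and then validates the strictly-increasing prefix and strictly-decreasing suffix around it with two independent membership-free all() checks.
import Mathlib
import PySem

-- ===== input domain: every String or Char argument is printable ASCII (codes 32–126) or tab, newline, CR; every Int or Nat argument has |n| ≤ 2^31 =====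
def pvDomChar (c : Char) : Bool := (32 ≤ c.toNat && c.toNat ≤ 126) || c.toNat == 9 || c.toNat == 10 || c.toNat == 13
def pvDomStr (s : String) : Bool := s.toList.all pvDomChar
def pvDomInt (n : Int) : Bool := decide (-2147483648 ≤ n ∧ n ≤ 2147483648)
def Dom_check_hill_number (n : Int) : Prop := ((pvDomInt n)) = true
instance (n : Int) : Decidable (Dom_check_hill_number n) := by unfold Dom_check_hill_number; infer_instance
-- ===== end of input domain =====

-- B locates the peak as the index of the maximum digit and validates both slopes around it, instead of A's flag-carrying single scan; same cost, different algorithm.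


-- ===== PORT A =====
-- digits = [int(d) for d in str(n)]  (int of a single digit char; total form valid under Pre_: 0 ≤ n)
def pvDigitsA (n : Int) : List Int :=
  (PySem.Int.toChars n).map (fun c => (PySem.Int.ofChars? [c]).getD 0)

-- the for-loop of A: index i, state 'increasing'; early 'return False' is the literal false branches
def pvLoopA (ds : List Int) (i : Nat) (increasing : Bool) : Bool :=
  if i < ds.length then
    if increasing then
      if ds.getD i 0 < ds.getD (i-1) 0 then pvLoopA ds (i+1) false
      else if ds.getD i 0 == ds.getD (i-1) 0 then false
      else pvLoopA ds (i+1) true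
    else
      if ds.getD i 0 ≥ ds.getD (i-1) 0 then false
      else pvLoopA ds (i+1) false
  else !increasing
termination_by ds.length - i

def check_hill_number (n : Int) : Bool :=
  let digits := pvDigitsA n
  if digits.length < 3 then false
  else pvLoopA digits 1 true

-- ===== PORT B =====
def pvDigitsB (n : Int) : List Int :=
  (PySem.Int.toChars n).map (fun c => (PySem.Int.ofChars? [c]).getD 0)

def check_hill_number_alt (n : Int) : Bool :=
  let digits := pvDigitsB n
  if digits.length < 3 then false
  else
    -- m = digits.index(max(digits))  (both total: digits is nonempty here, and the max is a member)
    let m := ((PySem.List.index? digits ((PySem.List.max? digits (fun x => x)).getD 0)).getD 0)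
    if m = digits.length - 1 then false
    else
      -- all(digits[j] < digits[j+1] for j in range(m))
      ((List.range m).all (fun j => decide (digits.getD j 0 < digits.getD (j+1) 0))) &&
      -- all(digits[j] > digits[j+1] for j in range(m, len(digits)-1)), indexed by k = j - m
      ((List.range (digits.length - 1 - m)).all
        (fun k => decide (digits.getD (m+k+1) 0 < digits.getD (m+k) 0)))

-- ===== PRECONDITION & SPEC =====
-- Pre_ excludes negative n, on which Python A raises ValueError (int('-') on the sign character).
def Pre_check_hill_number (n : Int) : Prop := 0 ≤ n
instance (n : Int) : Decidable (Pre_check_hill_number n) := by unfold Pre_check_hill_number; infer_instance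
def pvWitness_check_hill_number : Int := 121

def Spec_check_hill_number (n : Int) (out : Bool) : Prop := out = check_hill_number_alt n
instance (n : Int) (out : Bool) : Decidable (Spec_check_hill_number n out) := by unfold Spec_check_hill_number; infer_instance

-- ===== CLAIM (what is proved, stated in full; the proofs are below) =====
def Claim_equal_check_hill_number : Prop := ∀ (n : Int), Dom_check_hill_number n → Pre_check_hill_number n → Spec_check_hill_number n (check_hill_number n)

-- ===== LEMMAS AND PROOFS =====

-- Proof-only helpers: the two phases of A's scan, and a clean "hill" predicate both ports meet.
def pvUp (ds : List Int) (i : Nat) : Nat :=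
  if i < ds.length ∧ ds.getD i 0 > ds.getD (i-1) 0 then pvUp ds (i+1) else i
termination_by ds.length - i
decreasing_by omega

def pvDown (ds : List Int) (i : Nat) : Nat :=
  if i < ds.length ∧ ds.getD i 0 < ds.getD (i-1) 0 then pvDown ds (i+1) else i
termination_by ds.length - i
decreasing_by omega

def IncTo (ds : List Int) (m : Nat) : Prop := ∀ j, j < m → ds.getD j 0 < ds.getD (j+1) 0
def DecFrom (ds : List Int) (m : Nat) : Prop :=
  ∀ j, m ≤ j → j+1 < ds.length → ds.getD (j+1) 0 < ds.getD j 0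
def Hill (ds : List Int) : Prop := ∃ m, m+1 < ds.length ∧ IncTo ds m ∧ DecFrom ds m

-- descent phase of A equals "pvDown reaches the end"
theorem pvLoopA_false (ds : List Int) (i : Nat) :
    i ≤ ds.length → pvLoopA ds i false = decide (pvDown ds i = ds.length) := by
  fun_induction pvDown ds i with
  | case1 i h ih =>
    intro _
    rw [pvLoopA, if_pos h.1, if_neg Bool.false_ne_true,
        if_neg (by omega : ¬ ds.getD i 0 ≥ ds.getD (i-1) 0)]
    exact ih (by omega)
  | case2 i h =>
    intro h0
    rw [pvLoopA]
    by_cases hi : i < ds.length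
    · have hge : ds.getD i 0 ≥ ds.getD (i-1) 0 := by
        rcases not_and_or.mp h with h' | h' <;> omega
      rw [if_pos hi, if_neg Bool.false_ne_true, if_pos hge]
      exact (decide_eq_false (by omega : ¬ i = ds.length)).symm
    · rw [if_neg hi]
      have he : i = ds.length := by omega
      simp [he]

-- ascent phase of A equals the pvUp/pvDown composition
theorem pvLoopA_true (ds : List Int) (i : Nat) :
    i ≤ ds.length → pvLoopA ds i true =
      (if pvUp ds i = ds.length then false
       else decide (pvDown ds (pvUp ds i) = ds.length)) := by
  fun_induction pvUp ds i with
  | case1 i h ih =>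
    intro _
    rw [pvLoopA, if_pos h.1, if_pos rfl,
        if_neg (by omega : ¬ ds.getD i 0 < ds.getD (i-1) 0),
        if_neg (by simp only [beq_iff_eq]; omega : ¬ (ds.getD i 0 == ds.getD (i-1) 0) = true)]
    exact ih (by omega)
  | case2 i h =>
    intro h0
    rw [pvLoopA]
    by_cases hi : i < ds.length
    · have hle : ds.getD i 0 ≤ ds.getD (i-1) 0 := by
        rcases not_and_or.mp h with h' | h' <;> omega
      have hne : ¬ i = ds.length := by omega
      rw [if_pos hi, if_pos rfl, if_neg hne]
      by_cases hlt : ds.getD i 0 < ds.getD (i-1) 0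
      · rw [if_pos hlt, pvLoopA_false ds (i+1) (by omega),
            show pvDown ds i = pvDown ds (i+1) from by rw [pvDown, if_pos ⟨hi, hlt⟩]]
      · rw [if_neg hlt,
            if_pos (by simp only [beq_iff_eq]; omega : (ds.getD i 0 == ds.getD (i-1) 0) = true),
            show pvDown ds i = i from by
              rw [pvDown, if_neg (by tauto : ¬ (i < ds.length ∧ ds.getD i 0 < ds.getD (i-1) 0))]]
        exact (decide_eq_false hne).symm
    · rw [if_neg hi]
      have he : i = ds.length := by omega
      simp [he]

-- pvUp reaches exactly the peak when the hill shape holds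
theorem pvUp_eq (ds : List Int) (m : Nat) (hm : m+1 < ds.length)
    (hinc : IncTo ds m) (hpk : ds.getD (m+1) 0 < ds.getD m 0) :
    ∀ k i, 1 ≤ i → i + k = m+1 → pvUp ds i = m+1 := by
  intro k
  induction k with
  | zero =>
    intro i h1 he
    rw [pvUp, if_neg]
    · omega
    · intro ⟨_, hgt⟩
      have : i - 1 = m := by omega
      rw [this, (by omega : i = m+1)] at hgt
      omega
  | succ k ih =>
    intro i h1 he
    rw [pvUp, if_pos]
    · exact ih (i+1) (by omega) (by omega)
    · refine ⟨by omega, ?_⟩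
      have := hinc (i-1) (by omega)
      rw [(by omega : i - 1 + 1 = i)] at this
      omega

theorem pvDown_eq (ds : List Int) (m : Nat) (hdec : DecFrom ds m) :
    ∀ k i, m + 1 ≤ i → i + k = ds.length → pvDown ds i = ds.length := by
  intro k
  induction k with
  | zero =>
    intro i h1 he
    rw [pvDown, if_neg (by omega : ¬ (i < ds.length ∧ ds.getD i 0 < ds.getD (i-1) 0))]
    omega
  | succ k ih =>
    intro i h1 he
    rw [pvDown, if_pos]
    · exact ih (i+1) (by omega) (by omega)
    · refine ⟨by omega, ?_⟩
      have := hdec (i-1) (by omega) (by omega : i - 1 + 1 < ds.length)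
      rw [(by omega : i - 1 + 1 = i)] at this
      omega

theorem pvUp_le (ds : List Int) (i : Nat) : i ≤ pvUp ds i ∧ (i ≤ ds.length → pvUp ds i ≤ ds.length) := by
  fun_induction pvUp ds i with
  | case1 i h ih => exact ⟨by omega, fun _ => ih.2 (by omega)⟩
  | case2 i h => exact ⟨le_refl i, fun h => h⟩

theorem pvUp_inc (ds : List Int) (i : Nat) :
    ∀ j, i ≤ j+1 → j+1 < pvUp ds i → ds.getD j 0 < ds.getD (j+1) 0 := by
  fun_induction pvUp ds i with
  | case1 i h ih =>
    intro j hj1 hj2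
    by_cases he : j + 1 = i
    · have h2 := h.2
      rw [(by omega : i - 1 = j)] at h2
      rw [he]
      omega
    · exact ih j (by omega) hj2
  | case2 i h => intro j hj1 hj2; omega

theorem pvDown_dec (ds : List Int) (i : Nat) (h1 : 1 ≤ i) (hend : pvDown ds i = ds.length) :
    ∀ j, i ≤ j+1 → j+1 < ds.length → ds.getD (j+1) 0 < ds.getD j 0 := by
  fun_induction pvDown ds i with
  | case1 i h ih =>
    intro j hj1 hj2
    by_cases he : j + 1 = i
    · have h2 := h.2
      rw [(by omega : i - 1 = j)] at h2
      rw [he]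
      omega
    · exact ih (by omega) hend j (by omega) hj2
  | case2 i h =>
    intro j hj1 hj2
    omega

-- two chain lemmas: the peak dominates both sides
theorem incto_lt (ds : List Int) (m : Nat) (h : IncTo ds m) :
    ∀ j, j < m → ds.getD j 0 < ds.getD m 0 := by
  induction m with
  | zero => intro j hj; omega
  | succ m ih =>
    intro j hj
    have hlast := h m (by omega)
    by_cases he : j = m
    · rw [he]; exact hlast
    · have := ih (fun j hj => h j (by omega)) j (by omega)
      omega

theorem decfrom_lt (ds : List Int) (m : Nat) (h : DecFrom ds m) :
    ∀ k, m < k → k < ds.length → ds.getD k 0 < ds.getD m 0 := by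
  intro k
  induction k using Nat.strong_induction_on with
  | _ k ih =>
    intro hk hklen
    by_cases he : k = m + 1
    · rw [he]; exact h m (le_refl m) (by omega)
    · have h1 : ds.getD k 0 < ds.getD (k-1) 0 := by
        have := h (k-1) (by omega) (by omega : k - 1 + 1 < ds.length)
        rw [(by omega : k - 1 + 1 = k)] at this; exact this
      have h2 := ih (k-1) (by omega) (by omega) (by omega)
      omega

-- the phase form holds exactly on hills
theorem phase_iff_hill (ds : List Int) (hlen : 1 ≤ ds.length) :
    ((if pvUp ds 1 = ds.length then false
      else decide (pvDown ds (pvUp ds 1) = ds.length)) = true) ↔ Hill ds := by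
  constructor
  · intro hP
    by_cases hu : pvUp ds 1 = ds.length
    · rw [if_pos hu] at hP; exact absurd hP (by simp)
    · rw [if_neg hu, decide_eq_true_eq] at hP
      have hub := pvUp_le ds 1
      refine ⟨pvUp ds 1 - 1, by omega, ?_, ?_⟩
      · intro j hj
        exact pvUp_inc ds 1 j (by omega) (by omega)
      · intro j hj hjlen
        exact pvDown_dec ds (pvUp ds 1) (by omega) hP j (by omega) hjlen
  · rintro ⟨m, hm, hinc, hdec⟩
    have hpk : ds.getD (m+1) 0 < ds.getD m 0 := hdec m (le_refl m) hm
    have hu : pvUp ds 1 = m + 1 := pvUp_eq ds m hm hinc hpk m 1 (by omega) (by omega)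
    rw [hu, if_neg (by omega),
        pvDown_eq ds m hdec (ds.length - (m+1)) (m+1) (le_refl _) (by omega)]
    simp

-- membership stated through getD
theorem getD_mem_iff (ds : List Int) (v : Int) :
    v ∈ ds ↔ ∃ k, k < ds.length ∧ ds.getD k 0 = v := by
  constructor
  · intro hv
    obtain ⟨k, hk, he⟩ := List.mem_iff_getElem.mp hv
    exact ⟨k, hk, by rw [List.getD_eq_getElem ds 0 hk, he]⟩
  · rintro ⟨k, hk, he⟩
    rw [← he, List.getD_eq_getElem ds 0 hk]
    exact List.getElem_mem hk

-- under Hill with peak m, B's computed index is exactly m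
theorem index_max_eq (ds : List Int) (m : Nat) (hm : m+1 < ds.length)
    (hinc : IncTo ds m) (hdec : DecFrom ds m) :
    ((PySem.List.index? ds ((PySem.List.max? ds (fun x => x)).getD 0)).getD 0) = m := by
  have hpeak : ∀ k, k < ds.length → k ≠ m → ds.getD k 0 < ds.getD m 0 := by
    intro k hk hne
    rcases Nat.lt_or_ge k m with h | h
    · exact incto_lt ds m hinc k h
    · exact decfrom_lt ds m hdec k (by omega) hk
  have hne : ds ≠ [] := by intro h; rw [h] at hm; simp at hm
  obtain ⟨v, hv⟩ : ∃ v, PySem.List.max? ds (fun x => x) = some v := by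
    cases hmx : PySem.List.max? ds (fun x => x) with
    | none => exact absurd ((PySem.List.max?_eq_none_iff ds _).mp hmx) hne
    | some v => exact ⟨v, rfl⟩
  have hvm : v = ds.getD m 0 := by
    have h1 : ds.getD m 0 ≤ v :=
      PySem.List.max?_isMax hv (ds.getD m 0) ((getD_mem_iff ds _).mpr ⟨m, by omega, rfl⟩)
    have h2 : v ≤ ds.getD m 0 := by
      obtain ⟨k, hk, he⟩ := (getD_mem_iff ds v).mp (PySem.List.max?_mem hv)
      by_cases hkm : k = m
      · rw [hkm] at he; omega
      · have := hpeak k hk hkm; omega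
    omega
  rw [hv, Option.getD_some, hvm]
  have hidx : PySem.List.index? ds (ds.getD m 0) = some m := by
    rw [PySem.List.index?_eq_some_iff]
    refine ⟨ds.take m, ds.drop (m+1), ?_, List.length_take_of_le (by omega), ?_⟩
    · conv_lhs => rw [← List.take_append_drop m ds]
      congr 1
      rw [List.getD_eq_getElem ds 0 (by omega : m < ds.length)]
      exact (List.getElem_cons_drop (by omega)).symm
    · intro hmem
      obtain ⟨j, hj, he⟩ := List.mem_iff_getElem.mp hmem
      rw [List.length_take_of_le (by omega)] at hj
      rw [List.getElem_take] at he
      have := hpeak j (by omega) (by omega)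
      rw [List.getD_eq_getElem ds 0 (by omega : j < ds.length), he] at this
      omega
  rw [hidx, Option.getD_some]

-- B's computed index is always a valid position
theorem index_max_lt (ds : List Int) (hne : ds ≠ []) :
    ((PySem.List.index? ds ((PySem.List.max? ds (fun x => x)).getD 0)).getD 0) < ds.length := by
  obtain ⟨v, hv⟩ : ∃ v, PySem.List.max? ds (fun x => x) = some v := by
    cases hmx : PySem.List.max? ds (fun x => x) with
    | none => exact absurd ((PySem.List.max?_eq_none_iff ds _).mp hmx) hne
    | some v => exact ⟨v, rfl⟩
  have hvmem : v ∈ ds := PySem.List.max?_mem hv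
  obtain ⟨k, hks⟩ : ∃ k, PySem.List.index? ds v = some k := by
    cases hix : PySem.List.index? ds v with
    | none => exact absurd ((PySem.List.index?_eq_none_iff ds v).mp hix) (by simpa using hvmem)
    | some k => exact ⟨k, rfl⟩
  obtain ⟨hkl, _, _⟩ := PySem.List.getElem_of_index?_eq_some hks
  rw [hv, Option.getD_some, hks, Option.getD_some]
  exact hkl

-- B's body (past the length guard) holds exactly on hills
theorem B_iff_hill (ds : List Int) (hlen : 3 ≤ ds.length) :
    ((let m := ((PySem.List.index? ds ((PySem.List.max? ds (fun x => x)).getD 0)).getD 0)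
      if m = ds.length - 1 then false
      else ((List.range m).all (fun j => decide (ds.getD j 0 < ds.getD (j+1) 0))) &&
           ((List.range (ds.length - 1 - m)).all
             (fun k => decide (ds.getD (m+k+1) 0 < ds.getD (m+k) 0)))) = true) ↔ Hill ds := by
  constructor
  · intro hB
    set m := ((PySem.List.index? ds ((PySem.List.max? ds (fun x => x)).getD 0)).getD 0) with hmdef
    simp only at hB
    by_cases hme : m = ds.length - 1
    · rw [if_pos hme] at hB; exact absurd hB (by simp)
    · rw [if_neg hme, Bool.and_eq_true, List.all_eq_true, List.all_eq_true] at hB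
      obtain ⟨h1, h2⟩ := hB
      have hmlt : m < ds.length := index_max_lt ds (by intro h; rw [h] at hlen; simp at hlen)
      refine ⟨m, by omega, ?_, ?_⟩
      · intro j hj
        exact of_decide_eq_true (h1 j (List.mem_range.mpr hj))
      · intro j hj hjl
        have := h2 (j - m) (List.mem_range.mpr (by omega))
        rw [(by omega : m + (j - m) = j)] at this
        exact of_decide_eq_true this
  · rintro ⟨m, hm, hinc, hdec⟩
    have hidx := index_max_eq ds m hm hinc hdec
    simp only [hidx]
    rw [if_neg (by omega), Bool.and_eq_true, List.all_eq_true, List.all_eq_true]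
    refine ⟨fun j hj => ?_, fun k hk => ?_⟩
    · rw [List.mem_range] at hj
      exact decide_eq_true (hinc j hj)
    · rw [List.mem_range] at hk
      exact decide_eq_true (hdec (m+k) (by omega) (by omega))

-- ===== VERDICT (by name: the statement is the Claim_ definition above) =====
theorem check_hill_number_spec : Claim_equal_check_hill_number := by
  intro n _ _
  unfold Spec_check_hill_number check_hill_number check_hill_number_alt pvDigitsA pvDigitsB
  by_cases h : ((PySem.Int.toChars n).map (fun c => (PySem.Int.ofChars? [c]).getD 0)).length < 3
  · rw [if_pos h, if_pos h]
  · rw [if_neg h, if_neg h, pvLoopA_true _ 1 (by omega)]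
    exact Bool.eq_iff_iff.mpr
      ((phase_iff_hill _ (by omega)).trans (B_iff_hill _ (by omega)).symm)
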